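-- pv_equiv track=rewrite | github.com/cirosantilli/project-euler-solvers | solvers/427.py | f_via_compositions
-- ===== SOURCE A (Python) =====
-- def f_via_compositions(n: int) -> int:
--     """
--     Exact f(n) for small n using run-length compositions.
--
--     Any sequence can be described by a composition of n (run lengths).
--     For a composition with b parts, the number of sequences realizing it is:
--         n * (n-1)^(b-1)
--     because the first run can be any value (n choices) and each next run must
--     differ from the previous ((n-1) choices).
--
--     Then f(n) is the sum over compositions of:
--         [number of sequences] * [max part length]
--     """
--     if n <= 0:
--         return 0
--     total = 0
--     # A composition of n is determined by the cut set among the n-1 gaps.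
--     # mask bit i == 1 means a cut after position i (0-indexed gap).
--     for mask in range(1 << (n - 1)):
--         parts = 1
--         cur = 1
--         mx = 1
--         for i in range(n - 1):
--             if (mask >> i) & 1:
--                 if cur > mx:
--                     mx = cur
--                 parts += 1
--                 cur = 1
--             else:
--                 cur += 1
--         if cur > mx:
--             mx = cur
--
--         weight = n * pow(n - 1, parts - 1)
--         total += weight * mx
--     return total
-- ===== SOURCE B (Python) =====
-- def f_via_compositions(n: int) -> int:
--     """
--     Same f(n) via DP over compositions bounded by part size.
--
--     Let w = n - 1 and Q(L, m) = sum over compositions of m with all parts <= L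
--     of w^(parts - 1).  Then, counting the max via thresholds,
--         sum over compositions of m of w^(parts-1) * max_part
--           = sum_{L=0}^{n-1} (Q(n, n) - Q(L, n)),
--     and f(n) = n * that sum.  O(n^3) arithmetic ops instead of 2^(n-1) masks.
--     """
--     if n <= 0:
--         return 0
--     w = n - 1
--
--     def table(L):
--         # q[m] = Q(L, m); q[0] is a placeholder 0 (never read).
--         q = [0]
--         for m in range(1, n + 1):
--             s = 0
--             for k in range(1, min(L, m) + 1):
--                 s += 1 if k == m else w * q[m - k]
--             q.append(s)
--         return q
--
--     top = table(n)[n]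
--     total = 0
--     for L in range(n):
--         total += top - table(L)[n]
--     return n * total
-- ===== Notes on version B (the rewrite author's own statement) =====
-- stated objective: faster
-- what changed: Replaces the exponential bitmask enumeration of compositions with a cubic dynamic program Q(L,m) counting the weight of compositions of m with all parts at most L, recovering the max part by threshold counting; intended as faster (asymptotic), measured 390x at the largest size where A still finished (A times out beyond that, so a timing run could not confirm it at larger sizes).
import Mathlib
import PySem

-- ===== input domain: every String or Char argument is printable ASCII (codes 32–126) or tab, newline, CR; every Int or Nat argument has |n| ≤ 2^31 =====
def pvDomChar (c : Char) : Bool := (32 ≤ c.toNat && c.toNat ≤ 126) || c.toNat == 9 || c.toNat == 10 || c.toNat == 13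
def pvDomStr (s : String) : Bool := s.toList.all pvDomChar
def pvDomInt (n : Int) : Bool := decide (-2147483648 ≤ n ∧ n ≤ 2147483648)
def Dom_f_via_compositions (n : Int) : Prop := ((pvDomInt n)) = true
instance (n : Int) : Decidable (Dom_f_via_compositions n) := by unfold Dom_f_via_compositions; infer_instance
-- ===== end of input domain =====

-- B replaces A's exponential bitmask enumeration of compositions by a cubic DP
-- Q(L,m) over compositions with parts bounded by L, recovering the max part by
-- threshold counting; intended as faster (measured 390x at the largest size where
-- A still finished; unconfirmed beyond that because A times out).


-- ===== PORT A =====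
-- the body of A's inner loop over the gap index i (reads bit i of mask);
-- state is (parts, cur, mx).  '(mask >> i) & 1' is PySem.Int.band (mask >>> i.toNat) 1
-- (exact: i comes from range(n-1), so i ≥ 0).
def pvABody (mask : Int) (st : Int × Int × Int) (i : Int) : Int × Int × Int :=
  if PySem.Int.band (mask >>> i.toNat) 1 == 1 then
    (st.1 + 1, 1, if st.2.1 > st.2.2 then st.2.1 else st.2.2)
  else
    (st.1, st.2.1 + 1, st.2.2)

def f_via_compositions (n : Int) : Int :=
  if n ≤ 0 then 0
  else
    -- '1 << (n-1)' is (1 : Int) <<< (n-1).toNat (exact: n ≥ 1 here)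
    (PySem.List.pyRange 0 ((1 : Int) <<< (n - 1).toNat) 1).foldl
      (fun total mask =>
        let s := (PySem.List.pyRange 0 (n - 1) 1).foldl (pvABody mask) (1, 1, 1)
        let mx := if s.2.1 > s.2.2 then s.2.1 else s.2.2
        -- pow(n-1, parts-1): parts ≥ 1, so the exponent is the Nat (parts-1).toNat (exact)
        let weight := n * (n - 1) ^ (s.1 - 1).toNat
        total + weight * mx)
      0

-- ===== PORT B =====
-- Source B's 'table(L)': q[m] = Q(L,m) for m = 0..n, built by appending; q[0] = 0 is
-- a placeholder that is never read (the k = m case does not index q).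
def pvTableB (n : Int) (w : Int) (L : Int) : List Int :=
  (PySem.List.pyRange 1 (n + 1) 1).foldl
    (fun q m =>
      q ++ [(PySem.List.pyRange 1 (min L m + 1) 1).foldl
              (fun s k => s + (if k == m then 1 else w * PySem.List.pyGetD q (m - k) 0))
              0])
    [0]

def f_via_compositions_alt (n : Int) : Int :=
  if n ≤ 0 then 0
  else
    let w := n - 1
    let top := PySem.List.pyGetD (pvTableB n w n) n 0
    let total := (PySem.List.pyRange 0 n 1).foldl
      (fun t L => t + (top - PySem.List.pyGetD (pvTableB n w L) n 0)) 0
    n * total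

-- ===== PRECONDITION & SPEC =====
def Spec_f_via_compositions (n : Int) (out : Int) : Prop := out = f_via_compositions_alt n
instance (n : Int) (out : Int) : Decidable (Spec_f_via_compositions n out) := by unfold Spec_f_via_compositions; infer_instance

-- ===== CLAIM (what is proved, stated in full; the proofs are below) =====
def Claim_equal_f_via_compositions : Prop := ∀ (n : Int), Dom_f_via_compositions n → Spec_f_via_compositions n (f_via_compositions n)

-- ===== LEMMAS AND PROOFS =====

-- ---- generic list-sum helpers ----
theorem pvSumFlatMap {A : Type} (l : List A) (g : A → List Int) :
    (l.flatMap g).sum = (l.map (fun a => (g a).sum)).sum := by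
  induction l with
  | nil => rfl
  | cons x t ih => simp [List.flatMap_cons, List.sum_append, ih]

theorem pvSumComm {A B : Type} (l1 : List A) (l2 : List B) (f : A → B → Int) :
    (l1.map (fun a => (l2.map (f a)).sum)).sum
      = (l2.map (fun b => (l1.map (fun a => f a b)).sum)).sum := by
  induction l1 with
  | nil => simp
  | cons x t ih =>
    simp only [List.map_cons, List.sum_cons, ih, ← PySem.List.sum_map_add_int]

theorem pvSumMapSub {A : Type} (l : List A) (f g : A → Int) :
    (l.map (fun a => f a - g a)).sum = (l.map f).sum - (l.map g).sum := by
  induction l with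
  | nil => simp
  | cons x t ih => simp [ih]; ring

-- ---- the state machine of A's inner loop, over Nat ----
def pvStep (s : Nat × Nat × Nat) (b : Bool) : Nat × Nat × Nat :=
  if b then (s.1 + 1, 1, max s.2.2 s.2.1) else (s.1, s.2.1 + 1, s.2.2)

def pvCast (s : Nat × Nat × Nat) : Int × Int × Int := ((s.1 : Int), (s.2.1 : Int), (s.2.2 : Int))

-- bits of m, least significant first
def pvBits : Nat → Nat → List Bool
  | _, 0 => []
  | m, (k+1) => (m % 2 == 1) :: pvBits (m / 2) k

-- compositions of m (lists of positive parts), grouped by last part k+1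
def pvComps : Nat → List (List Nat)
  | 0 => [[]]
  | (m+1) => (List.range (m+1)).flatMap (fun k => (pvComps (m - k)).map (fun c => c ++ [k + 1]))

def pvIncLast : List Nat → List Nat
  | [] => []
  | [x] => [x + 1]
  | x :: y :: t => x :: pvIncLast (y :: t)

def pvMax (c : List Nat) : Nat := c.foldl max 1

def pvStt (c : List Nat) : Nat × Nat × Nat := (c.length, c.getLastD 1, c.dropLast.foldl max 1)

-- B's per-composition weight-and-threshold DP value
def pvQ (w L : Int) : Nat → Int
  | 0 => 0
  | (m+1) => ((List.range (m+1)).map (fun (k : Nat) =>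
      if (k : Int) + 1 ≤ L then (if k = m then (1 : Int) else w * pvQ w L (m - k)) else 0)).sum

-- ---- bits lemmas ----
theorem pvBits_succ_right (k : Nat) : ∀ m, pvBits m (k+1) = pvBits m k ++ [(m / 2^k % 2 == 1)] := by
  induction k with
  | zero => intro m; simp [pvBits]
  | succ k ih =>
    intro m
    have hdiv : m / 2 / 2 ^ k = m / 2 ^ (k + 1) := by
      rw [Nat.div_div_eq_div_mul, pow_succ, mul_comm]
    calc pvBits m (k+2) = (m % 2 == 1) :: pvBits (m / 2) (k+1) := rfl
      _ = (m % 2 == 1) :: (pvBits (m / 2) k ++ [(m / 2 / 2 ^ k % 2 == 1)]) := by rw [ih]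
      _ = pvBits m (k+1) ++ [(m / 2 ^ (k+1) % 2 == 1)] := by rw [hdiv]; rfl

theorem pvBits_add_pow (k : Nat) : ∀ i, pvBits (2^k + i) k = pvBits i k := by
  induction k with
  | zero => intro i; rfl
  | succ k ih =>
    intro i
    have hp : 2 ^ (k+1) = 2 * 2 ^ k := by rw [pow_succ, mul_comm]
    have hm : (2 ^ (k+1) + i) % 2 = i % 2 := by omega
    have hd : (2 ^ (k+1) + i) / 2 = 2 ^ k + i / 2 := by omega
    show ((2 ^ (k+1) + i) % 2 == 1) :: pvBits ((2 ^ (k+1) + i) / 2) k = (i % 2 == 1) :: pvBits (i / 2) k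
    rw [hm, hd, ih]

theorem pvBits_low {k i : Nat} (h : i < 2^k) : pvBits i (k+1) = pvBits i k ++ [false] := by
  rw [pvBits_succ_right k i, Nat.div_eq_of_lt h]; rfl

theorem pvBits_high {k i : Nat} (h : i < 2^k) : pvBits (2^k + i) (k+1) = pvBits i k ++ [true] := by
  rw [pvBits_succ_right k _, pvBits_add_pow k i]
  have hd : (2 ^ k + i) / 2 ^ k = 1 := by
    rw [add_comm (2^k) i, Nat.add_div_right i (Nat.two_pow_pos k), Nat.div_eq_of_lt h]
  rw [hd]; rfl

-- ---- composition lemmas ----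
theorem pvComps_ne_nil {m : Nat} {c : List Nat} (h : c ∈ pvComps (m+1)) : c ≠ [] := by
  rw [pvComps] at h
  simp only [List.mem_flatMap, List.mem_map, List.mem_range] at h
  obtain ⟨k, _, c', _, rfl⟩ := h
  simp

theorem pvComps_sum_pos : ∀ m, ∀ c ∈ pvComps m, c.sum = m ∧ ∀ x ∈ c, 1 ≤ x := by
  intro m
  induction m using Nat.strong_induction_on with
  | _ m ih =>
    match m with
    | 0 => intro c hc; rw [pvComps] at hc; simp at hc; subst hc; simp
    | (m+1) =>
      intro c hc
      rw [pvComps] at hc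
      simp only [List.mem_flatMap, List.mem_map, List.mem_range] at hc
      obtain ⟨k, hk, c', hc', rfl⟩ := hc
      obtain ⟨hs, hp⟩ := ih (m - k) (by omega) c' hc'
      constructor
      · simp [List.sum_append, hs]; omega
      · intro x hx
        simp only [List.mem_append, List.mem_singleton] at hx
        rcases hx with hx | hx
        · exact hp x hx
        · omega

theorem pvIncLast_snoc : ∀ (c : List Nat) (k : Nat), pvIncLast (c ++ [k]) = c ++ [k + 1]
  | [], _ => rfl
  | [_], _ => rfl
  | x :: y :: t, k => by
    show x :: pvIncLast (y :: (t ++ [k])) = x :: y :: (t ++ [k + 1])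
    rw [← List.cons_append, pvIncLast_snoc (y :: t) k, List.cons_append]

theorem pvStt_snoc (a : List Nat) (b : Nat) :
    pvStt (a ++ [b]) = (a.length + 1, b, a.foldl max 1) := by
  simp [pvStt]

theorem pvComps_eq (m : Nat) :
    pvComps (m+1) = (List.range (m+1)).flatMap (fun k => (pvComps (m - k)).map (fun c => c ++ [k + 1])) := by
  rw [pvComps]

theorem pvComps_succ (m : Nat) (hm : 1 ≤ m) :
    pvComps (m+1) = (pvComps m).map (fun c => c ++ [1]) ++ (pvComps m).map pvIncLast := by
  obtain ⟨m', rfl⟩ : ∃ m', m = m' + 1 := ⟨m - 1, by omega⟩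
  rw [pvComps_eq (m'+1), List.range_succ_eq_map, List.flatMap_cons, List.flatMap_map]
  refine congrArg₂ (· ++ ·) ?_ ?_
  · simp
  · rw [pvComps_eq m', List.map_flatMap]
    congr 1
    funext k
    rw [List.map_map, Nat.succ_sub_succ]
    congr 1
    funext c
    simp [pvIncLast_snoc]


-- max over a composition decomposes into (max of dropLast, last)
theorem pvMax_snoc' (c : List Nat) (k : Nat) : (c ++ [k]).foldl max 1 = max (c.foldl max 1) k := by
  rw [List.foldl_append]; rfl

theorem pvMax_decomp {c : List Nat} (h : c ≠ []) :
    pvMax c = max (c.dropLast.foldl max 1) (c.getLastD 1) := by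
  obtain ⟨a, b, rfl⟩ := (List.eq_nil_or_concat c).resolve_left h
  simp only [List.concat_eq_append]
  unfold pvMax
  rw [pvMax_snoc' a b, List.dropLast_concat]
  simp

theorem pvMax_snoc (c : List Nat) (k : Nat) : pvMax (c ++ [k]) = max (pvMax c) k :=
  pvMax_snoc' c k

theorem pvFoldlMax_init : ∀ (c : List Nat) (a : Nat), a ≤ c.foldl max a
  | [], _ => le_refl _
  | x :: t, a => le_trans (le_max_left a x) (pvFoldlMax_init t (max a x))

theorem pvFoldlMax_le : ∀ (c : List Nat) (a b : Nat), a ≤ b → (∀ x ∈ c, x ≤ b) → c.foldl max a ≤ b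
  | [], _, _, h, _ => h
  | x :: t, a, b, h, hall => by
    refine pvFoldlMax_le t (max a x) b ?_ (fun y hy => hall y (by simp [hy]))
    exact max_le h (hall x (by simp))

theorem pvMax_pos (c : List Nat) : 1 ≤ pvMax c := pvFoldlMax_init c 1

theorem pvMax_le {m : Nat} (hm : 1 ≤ m) {c : List Nat} (h : c ∈ pvComps m) : pvMax c ≤ m := by
  obtain ⟨hs, _⟩ := pvComps_sum_pos m c h
  refine pvFoldlMax_le c 1 m hm (fun x hx => ?_)
  calc x ≤ c.sum := List.le_sum_of_mem hx
    _ = m := hs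

-- state machine ↔ composition structure
theorem pvStt_snoc_one {c : List Nat} (h : c ≠ []) : pvStt (c ++ [1]) = pvStep (pvStt c) true := by
  rw [pvStt_snoc]
  show _ = (c.length + 1, 1, max (c.dropLast.foldl max 1) (c.getLastD 1))
  rw [← pvMax_decomp h]
  rfl

theorem pvStt_incLast {c : List Nat} (h : c ≠ []) : pvStt (pvIncLast c) = pvStep (pvStt c) false := by
  obtain ⟨a, b, rfl⟩ := (List.eq_nil_or_concat c).resolve_left h
  simp only [List.concat_eq_append]
  rw [pvIncLast_snoc, pvStt_snoc, pvStt_snoc]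
  rfl

-- summing any f of the final state over all masks = summing over compositions
theorem pvDL (k : Nat) : ∀ (f : Nat × Nat × Nat → Int),
    ((List.range (2^k)).map (fun M => f (List.foldl pvStep (1, 1, 1) (pvBits M k)))).sum
      = ((pvComps (k+1)).map (fun c => f (pvStt c))).sum := by
  induction k with
  | zero =>
    intro f
    have h0 : pvComps 0 = [[]] := by rw [pvComps]
    have h1 : pvComps 1 = [[1]] := by rw [pvComps_eq 0]; simp [h0]
    simp [h1, pvStt, pvBits]
  | succ k ih =>
    intro f
    have h2 : 2 ^ (k+1) = 2 ^ k + 2 ^ k := by rw [pow_succ]; omega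
    rw [h2, List.range_add, List.map_append, List.sum_append, List.map_map]
    have hlow : (List.range (2^k)).map (fun M => f (List.foldl pvStep (1, 1, 1) (pvBits M (k+1))))
        = (List.range (2^k)).map (fun M => (fun s => f (pvStep s false)) (List.foldl pvStep (1, 1, 1) (pvBits M k))) := by
      apply List.map_congr_left
      intro M hM
      rw [pvBits_low (List.mem_range.mp hM), List.foldl_append]
      rfl
    have hhigh : (List.range (2^k)).map
          ((fun M => f (List.foldl pvStep (1, 1, 1) (pvBits M (k+1)))) ∘ (fun x => 2 ^ k + x))
        = (List.range (2^k)).map (fun M => (fun s => f (pvStep s true)) (List.foldl pvStep (1, 1, 1) (pvBits M k))) := by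
      apply List.map_congr_left
      intro M hM
      show f (List.foldl pvStep (1, 1, 1) (pvBits (2 ^ k + M) (k+1))) = _
      rw [pvBits_high (List.mem_range.mp hM), List.foldl_append]
      rfl
    rw [hlow, hhigh, ih (fun s => f (pvStep s false)), ih (fun s => f (pvStep s true))]
    rw [pvComps_succ (k+1) (by omega), List.map_append, List.sum_append, List.map_map, List.map_map]
    have e1 : (pvComps (k+1)).map ((fun c => f (pvStt c)) ∘ (fun c => c ++ [1]))
        = (pvComps (k+1)).map (fun c => f (pvStep (pvStt c) true)) := by
      apply List.map_congr_left
      intro c hc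
      show f (pvStt (c ++ [1])) = _
      rw [pvStt_snoc_one (pvComps_ne_nil hc)]
    have e2 : (pvComps (k+1)).map ((fun c => f (pvStt c)) ∘ pvIncLast)
        = (pvComps (k+1)).map (fun c => f (pvStep (pvStt c) false)) := by
      apply List.map_congr_left
      intro c hc
      show f (pvStt (pvIncLast c)) = _
      rw [pvStt_incLast (pvComps_ne_nil hc)]
    rw [e1, e2]
    exact add_comm _ _

-- parts count stays ≥ 1
theorem pvStep_parts : ∀ (bs : List Bool) (s : Nat × Nat × Nat), 1 ≤ s.1 →
    1 ≤ (List.foldl pvStep s bs).1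
  | [], _, h => h
  | b :: t, s, h => by
    refine pvStep_parts t (pvStep s b) ?_
    cases b <;> simp [pvStep]
    omega

-- A's inner loop is the bit-fold of pvStep
theorem pvStepCast (M : Nat) (N : Nat) (s : Nat × Nat × Nat) :
    pvABody (M : Int) (pvCast s) (N : Int) = pvCast (pvStep s (M / 2^N % 2 == 1)) := by
  obtain ⟨p, c, mx⟩ := s
  simp only [pvABody, pvCast, Int.toNat_natCast]
  have hshift : ((M : Int) >>> N) = ((M >>> N : Nat) : Int) := rfl
  rw [hshift, show (1 : Int) = ((1 : Nat) : Int) from rfl, PySem.Int.band_natCast,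
    Nat.and_one_is_mod, Nat.shiftRight_eq_div_pow]
  rcases Nat.mod_two_eq_zero_or_one (M / 2 ^ N) with h | h <;> rw [h]
  · simp [pvStep]
  · have ht : (((1 : Nat) : Int) == ((1 : Nat) : Int)) = true := by simp
    rw [ht]
    have ht2 : ((1 : Nat) == 1) = true := by simp
    rw [ht2]
    simp only [pvStep, if_pos]
    by_cases hcm : mx < c
    · rw [if_pos (by exact_mod_cast hcm), Nat.max_eq_right (le_of_lt hcm)]
      push_cast; rfl
    · rw [if_neg (by exact_mod_cast hcm), Nat.max_eq_left (by omega)]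
      push_cast; rfl

theorem pvInner (M : Nat) : ∀ (N : Nat) (s : Nat × Nat × Nat),
    (List.range N).foldl (fun st (i : Nat) => pvABody (M : Int) st (i : Int)) (pvCast s)
      = pvCast (List.foldl pvStep s (pvBits M N))
  | 0, s => rfl
  | (N+1), s => by
    rw [List.range_succ, List.foldl_append, pvBits_succ_right N M, List.foldl_append,
      pvInner M N s]
    exact pvStepCast M N _

-- A = n · Σ_{c ∈ comps n} (n-1)^(parts-1) · max-part
theorem pvCastMax (mx c : Nat) :
    (if (c : Int) > (mx : Int) then (c : Int) else (mx : Int)) = ((max mx c : Nat) : Int) := by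
  by_cases h : mx < c
  · rw [if_pos (by exact_mod_cast h), Nat.max_eq_right (le_of_lt h)]
  · rw [if_neg (by exact_mod_cast h), Nat.max_eq_left (by omega)]

theorem pvA_eq (n : Int) (hn : 1 ≤ n) :
    f_via_compositions n
      = n * ((pvComps n.toNat).map
          (fun c => (n - 1) ^ (c.length - 1) * ((pvMax c : Nat) : Int))).sum := by
  have hn0 : ¬ n ≤ 0 := by omega
  have hNn : (n - 1).toNat + 1 = n.toNat := by omega
  unfold f_via_compositions
  rw [if_neg hn0]
  have e1 : ((1 : Int) <<< (n - 1).toNat) = ((2 ^ (n - 1).toNat : Nat) : Int) := by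
    simp [Int.shiftLeft_eq]
  have e2 : PySem.List.pyRange 0 (n - 1) 1
      = List.map (fun (k : Nat) => (k : Int)) (List.range (n - 1).toNat) := by
    have hN1 : n - 1 = (((n - 1).toNat : Nat) : Int) := by omega
    rw [hN1, PySem.List.pyRange_zero_natCast]
    simp
  have e3 : ∀ M : Nat, (List.range (n - 1).toNat).foldl
        (fun st (i : Nat) => pvABody (M : Int) st (i : Int)) ((1 : Int), (1 : Int), (1 : Int))
      = pvCast ((pvBits M (n - 1).toNat).foldl pvStep (1, 1, 1)) := fun M =>
    pvInner M (n - 1).toNat (1, 1, 1)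
  simp only [e1, PySem.List.pyRange_zero_natCast, List.foldl_map, e2, e3]
  rw [PySem.List.foldl_add]
  have e4 : ∀ s' : Nat × Nat × Nat, 1 ≤ s'.1 →
      n * (n - 1) ^ (((pvCast s').1 - 1)).toNat *
        (if (pvCast s').2.1 > (pvCast s').2.2 then (pvCast s').2.1 else (pvCast s').2.2)
      = n * ((n - 1) ^ (s'.1 - 1) * ((max s'.2.2 s'.2.1 : Nat) : Int)) := by
    rintro ⟨p, c, mx⟩ hp
    simp only [pvCast]
    rw [pvCastMax mx c]
    have hexp : (((p : Int) - 1)).toNat = p - 1 := by omega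
    rw [hexp, mul_assoc]
  have e5 : (List.range (2 ^ (n - 1).toNat)).map
        (fun M => n * (n - 1) ^ (((pvCast ((pvBits M (n - 1).toNat).foldl pvStep (1, 1, 1))).1 - 1)).toNat *
          (if (pvCast ((pvBits M (n - 1).toNat).foldl pvStep (1, 1, 1))).2.1 >
                (pvCast ((pvBits M (n - 1).toNat).foldl pvStep (1, 1, 1))).2.2
            then (pvCast ((pvBits M (n - 1).toNat).foldl pvStep (1, 1, 1))).2.1
            else (pvCast ((pvBits M (n - 1).toNat).foldl pvStep (1, 1, 1))).2.2))
      = (List.range (2 ^ (n - 1).toNat)).map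
        (fun M => (fun s => n * ((n - 1) ^ (s.1 - 1) * ((max s.2.2 s.2.1 : Nat) : Int)))
          ((pvBits M (n - 1).toNat).foldl pvStep (1, 1, 1))) := by
    apply List.map_congr_left
    intro M _
    exact e4 _ (pvStep_parts (pvBits M (n - 1).toNat) (1, 1, 1) (by norm_num))
  rw [e5, pvDL ((n - 1).toNat) (fun s => n * ((n - 1) ^ (s.1 - 1) * ((max s.2.2 s.2.1 : Nat) : Int))), hNn]
  have e6 : (pvComps n.toNat).map
        (fun c => n * ((n - 1) ^ ((pvStt c).1 - 1) * ((max (pvStt c).2.2 (pvStt c).2.1 : Nat) : Int)))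
      = (pvComps n.toNat).map
        (fun c => n * ((n - 1) ^ (c.length - 1) * ((pvMax c : Nat) : Int))) := by
    apply List.map_congr_left
    intro c hc
    have hne : c ≠ [] := pvComps_ne_nil (m := (n-1).toNat) (by rwa [hNn])
    simp only [pvStt]
    rw [← pvMax_decomp hne]
  rw [e6, List.sum_map_mul_left, zero_add]

-- B1: the DP value is the weighted count of compositions with max part ≤ L
theorem pvQ_succ (w L : Int) (m : Nat) :
    pvQ w L (m+1) = ((List.range (m+1)).map (fun (k : Nat) =>
      if (k : Int) + 1 ≤ L then (if k = m then (1 : Int) else w * pvQ w L (m - k)) else 0)).sum := by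
  rw [pvQ]

theorem pvQ_eq (w L : Int) : ∀ m,
    pvQ w L (m+1)
      = ((pvComps (m+1)).map
          (fun c => w ^ (c.length - 1) * (if ((pvMax c : Nat) : Int) ≤ L then (1 : Int) else 0))).sum := by
  intro m
  induction m using Nat.strong_induction_on with
  | _ m ih =>
  rw [pvQ_succ, pvComps_eq m, List.map_flatMap, pvSumFlatMap]
  refine congrArg List.sum (List.map_congr_left ?_)
  intro k hk
  have hkm1 : k < m + 1 := List.mem_range.mp hk
  rw [List.map_map]
  by_cases hkm : k = m
  · subst hkm
    have h0 : pvComps 0 = [[]] := by rw [pvComps]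
    rw [if_pos rfl, Nat.sub_self, h0]
    have hmx : pvMax [k + 1] = k + 1 := by
      unfold pvMax
      simp
    simp only [List.map_cons, List.map_nil, Function.comp, List.nil_append, List.sum_cons,
      List.sum_nil, hmx, List.length_singleton, Nat.sub_self, pow_zero, one_mul, add_zero]
    push_cast
    rfl
  · have hklt : k < m := by omega
    have hmk : m - k = (m - k - 1) + 1 := by omega
    by_cases hL : (k : Int) + 1 ≤ L
    · rw [if_pos hL, if_neg hkm]
      have hchunk : (pvComps (m - k)).map
            ((fun c => w ^ (c.length - 1) * (if ((pvMax c : Nat) : Int) ≤ L then (1 : Int) else 0))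
              ∘ (fun c => c ++ [k + 1]))
          = (pvComps (m - k)).map
            (fun c => w * (w ^ (c.length - 1) * (if ((pvMax c : Nat) : Int) ≤ L then (1 : Int) else 0))) := by
        apply List.map_congr_left
        intro c hc
        have hne : c ≠ [] := pvComps_ne_nil (m := m - k - 1) (by rwa [← hmk])
        have hlen : c.length = (c.length - 1) + 1 := by
          have := List.length_pos_iff.mpr hne
          omega
        show w ^ ((c ++ [k+1]).length - 1) * (if ((pvMax (c ++ [k+1]) : Nat) : Int) ≤ L then (1:Int) else 0) = _
        rw [List.length_append, List.length_singleton, Nat.add_sub_cancel, pvMax_snoc]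
        have hiff : ((max (pvMax c) (k+1) : Nat) : Int) ≤ L ↔ ((pvMax c : Nat) : Int) ≤ L := by
          push_cast
          omega
        rw [if_congr hiff rfl rfl]
        conv_lhs => rw [hlen]
        rw [pow_succ']
        ring
      rw [hchunk, List.sum_map_mul_left, hmk, ih (m - k - 1) (by omega)]
    · rw [if_neg hL]
      have hchunk : (pvComps (m - k)).map
            ((fun c => w ^ (c.length - 1) * (if ((pvMax c : Nat) : Int) ≤ L then (1 : Int) else 0))
              ∘ (fun c => c ++ [k + 1]))
          = (pvComps (m - k)).map (fun _ => (0 : Int)) := by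
        apply List.map_congr_left
        intro c hc
        show w ^ ((c ++ [k+1]).length - 1) * (if ((pvMax (c ++ [k+1]) : Nat) : Int) ≤ L then (1:Int) else 0) = 0
        rw [pvMax_snoc]
        have : ¬ ((max (pvMax c) (k+1) : Nat) : Int) ≤ L := by
          push_cast
          omega
        rw [if_neg this, mul_zero]
      rw [hchunk]
      simp

-- threshold counting: Σ_{L<n} (1 - [Mx ≤ L]) = Mx when 1 ≤ Mx ≤ n
theorem pvCount (Mx : Nat) : ∀ nn : Nat, 1 ≤ Mx → Mx ≤ nn →
    ((List.range nn).map (fun (L : Nat) => (1 : Int) - (if ((Mx : Nat) : Int) ≤ ((L : Nat) : Int) then 1 else 0))).sum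
      = (Mx : Int) := by
  intro nn
  induction nn with
  | zero => intro h1 h2; omega
  | succ nn ih =>
    intro h1 h2
    by_cases h : Mx ≤ nn
    · rw [List.range_succ, List.map_append, List.sum_append, ih h1 h]
      simp [h]
    · have hM : Mx = nn + 1 := by omega
      have hconst : (List.range (nn+1)).map
            (fun L => (1 : Int) - (if ((Mx : Nat) : Int) ≤ ((L : Nat) : Int) then 1 else 0))
          = (List.range (nn+1)).map (fun _ => (1 : Int)) := by
        apply List.map_congr_left
        intro L hL
        have hLlt : L < nn + 1 := List.mem_range.mp hL
        have : ¬ ((Mx : Nat) : Int) ≤ ((L : Nat) : Int) := by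
          omega
        rw [if_neg this, sub_zero]
      rw [hconst, PySem.List.sum_map_const_int]
      simp [hM]

-- B's table is the list of DP values
theorem pvInnerSum (w L : Int) (hL : 0 ≤ L) (j : Nat) :
    (PySem.List.pyRange 1 (min L (1 + (j : Int)) + 1) 1).foldl
        (fun s k => s + (if k == (1 + (j : Int)) then (1 : Int)
          else w * PySem.List.pyGetD ((List.range (j+1)).map (pvQ w L)) ((1 + (j : Int)) - k) 0))
        0
      = pvQ w L (j+1) := by
  rw [PySem.List.foldl_add, zero_add, PySem.List.pyRange_one]
  set t : Nat := (min L (1 + (j : Int)) + 1 - 1).toNat with hts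
  have htdef : (t : Int) = min L (1 + (j : Int)) := by
    simp only [hts, add_sub_cancel_right]
    omega
  have ht : t ≤ j + 1 := by omega
  rw [List.map_map]
  conv_rhs => rw [pvQ_succ, show j + 1 = t + (j + 1 - t) from by omega, List.range_add,
    List.map_append, List.sum_append]
  have htail : (List.range (j + 1 - t)).map
        ((fun (k : Nat) => if (k : Int) + 1 ≤ L then (if k = j then (1 : Int) else w * pvQ w L (j - k)) else 0)
          ∘ (fun x => t + x))
      = (List.range (j + 1 - t)).map (fun _ => (0 : Int)) := by
    apply List.map_congr_left
    intro i hi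
    have hij : i < j + 1 - t := List.mem_range.mp hi
    show (if ((t + i : Nat) : Int) + 1 ≤ L then _ else (0:Int)) = 0
    rw [if_neg (by push_cast; omega)]
  have hhead : (List.range t).map
        ((fun k => if k == (1 + (j : Int)) then (1 : Int)
            else w * PySem.List.pyGetD ((List.range (j+1)).map (pvQ w L)) ((1 + (j : Int)) - k) 0)
          ∘ (fun (i : Nat) => 1 + (i : Int)))
      = (List.range t).map
        (fun (k : Nat) => if (k : Int) + 1 ≤ L then (if k = j then (1 : Int) else w * pvQ w L (j - k)) else 0) := by
    apply List.map_congr_left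
    intro i hi
    have hit : i < t := List.mem_range.mp hi
    have hiL : (i : Int) + 1 ≤ L := by omega
    show (if (1 + (i : Int)) == (1 + (j : Int)) then (1 : Int)
        else w * PySem.List.pyGetD ((List.range (j+1)).map (pvQ w L)) ((1 + (j : Int)) - (1 + (i : Int))) 0)
      = _
    rw [if_pos hiL]
    by_cases hij : i = j
    · subst hij
      simp
    · have hb : ((1 + (i : Int)) == (1 + (j : Int))) = false := by
        simp only [beq_eq_false_iff_ne, ne_eq]
        omega
      rw [hb, if_neg hij]
      have hsub : (1 + (j : Int)) - (1 + (i : Int)) = ((j - i : Nat) : Int) := by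
        have : i ≤ j := by omega
        push_cast [this]
        ring
      simp only [Bool.false_eq_true, if_false]
      rw [hsub, PySem.List.pyGetD_natCast, List.getD_eq_getElem?_getD]
      have hlt : j - i < j + 1 := by omega
      rw [List.getElem?_map, List.getElem?_range hlt]
      rfl
  rw [List.map_map, htail, hhead]
  simp

theorem pvTabAux (w L : Int) (hL : 0 ≤ L) : ∀ j : Nat,
    (List.range j).foldl
      (fun x (y : Nat) => x ++ [(PySem.List.pyRange 1 (min L (1 + (y : Int)) + 1) 1).foldl
        (fun s k => s + (if k == (1 + (y : Int)) then (1 : Int) else w * PySem.List.pyGetD x ((1 + (y : Int)) - k) 0)) 0])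
      [0]
    = (List.range (j + 1)).map (pvQ w L)
  | 0 => by
    have hq0 : pvQ w L 0 = 0 := by rw [pvQ]
    simp [hq0]
  | (j+1) => by
    rw [List.range_succ, List.foldl_append, pvTabAux w L hL j,
      List.range_succ (n := j + 1), List.map_append]
    simp only [List.foldl_cons, List.foldl_nil, List.map_singleton]
    congr 1
    exact congrArg (fun z => [z]) (pvInnerSum w L hL j)

theorem pvTab (w : Int) (L : Int) (hL : 0 ≤ L) (nN : Nat) :
    pvTableB (nN : Int) w L = (List.range (nN + 1)).map (pvQ w L) := by
  unfold pvTableB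
  have e2 : PySem.List.pyRange 1 ((nN : Int) + 1) 1
      = (List.range nN).map (fun (k : Nat) => 1 + (k : Int)) := by
    rw [PySem.List.pyRange_one]
    simp
  rw [e2, List.foldl_map]
  exact pvTabAux w L hL nN

-- B = n · Σ_{L<n} (Q(n,n) - Q(L,n))
theorem pvB_eq (n : Int) (hn : 1 ≤ n) :
    f_via_compositions_alt n
      = n * ((List.range n.toNat).map
          (fun (L : Nat) => pvQ (n - 1) n n.toNat - pvQ (n - 1) ((L : Nat) : Int) n.toNat)).sum := by
  obtain ⟨nN, rfl⟩ : ∃ nN : Nat, n = (nN : Int) := ⟨n.toNat, by omega⟩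
  have hnN : 1 ≤ nN := by exact_mod_cast hn
  have hn0 : ¬ (nN : Int) ≤ 0 := by exact_mod_cast not_le.mpr (by omega : (0:Int) < nN)
  unfold f_via_compositions_alt
  rw [if_neg hn0]
  have htop : PySem.List.pyGetD (pvTableB (nN : Int) ((nN : Int) - 1) (nN : Int)) (nN : Int) 0
      = pvQ ((nN : Int) - 1) (nN : Int) nN := by
    rw [pvTab _ _ (by positivity) nN, PySem.List.pyGetD_natCast,
      PySem.List.getD_map_range _ _ _ _ (by omega)]
  have e2 : PySem.List.pyRange 0 (nN : Int) 1 = (List.range nN).map (fun (k : Nat) => (k : Int)) := by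
    rw [PySem.List.pyRange_zero_natCast]
  simp only [htop, e2, List.foldl_map]
  rw [PySem.List.foldl_add, zero_add]
  have e3 : (List.range nN).map
        (fun (L : Nat) => pvQ ((nN : Int) - 1) (nN : Int) nN
          - PySem.List.pyGetD (pvTableB (nN : Int) ((nN : Int) - 1) ((L : Nat) : Int)) (nN : Int) 0)
      = (List.range nN).map
        (fun (L : Nat) => pvQ ((nN : Int) - 1) (nN : Int) (Int.toNat (nN : Int))
          - pvQ ((nN : Int) - 1) ((L : Nat) : Int) (Int.toNat (nN : Int))) := by
    apply List.map_congr_left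
    intro L _
    rw [pvTab _ _ (by positivity) nN, PySem.List.pyGetD_natCast,
      PySem.List.getD_map_range _ _ _ _ (by omega), Int.toNat_natCast]
  rw [e3, Int.toNat_natCast]

-- the two sums agree
theorem pvSums_eq (n : Int) (hn : 1 ≤ n) :
    ((List.range n.toNat).map
        (fun (L : Nat) => pvQ (n - 1) n n.toNat - pvQ (n - 1) ((L : Nat) : Int) n.toNat)).sum
      = ((pvComps n.toNat).map
          (fun c => (n - 1) ^ (c.length - 1) * ((pvMax c : Nat) : Int))).sum := by
  obtain ⟨m, hm⟩ : ∃ m : Nat, n.toNat = m + 1 := ⟨n.toNat - 1, by omega⟩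
  have hcastn : ((n.toNat : Nat) : Int) = n := by omega
  set w := n - 1 with hw
  set t : List Nat → Int → Int :=
    fun c L => w ^ (c.length - 1) * (if ((pvMax c : Nat) : Int) ≤ L then (1 : Int) else 0) with hT
  have hq : ∀ L : Int, pvQ w L n.toNat = ((pvComps n.toNat).map (fun c => t c L)).sum := by
    intro L
    rw [hm, pvQ_eq w L m]
  have e1 : (List.range n.toNat).map
        (fun (L : Nat) => pvQ w n n.toNat - pvQ w ((L : Nat) : Int) n.toNat)
      = (List.range n.toNat).map
        (fun (L : Nat) => ((pvComps n.toNat).map (fun c => t c n - t c ((L : Nat) : Int))).sum) := by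
    apply List.map_congr_left
    intro L _
    rw [hq n, hq ((L : Nat) : Int), ← pvSumMapSub]
  rw [e1, pvSumComm]
  apply congrArg List.sum
  apply List.map_congr_left
  intro c hc
  have hMx1 : 1 ≤ pvMax c := pvMax_pos c
  have hMxn : pvMax c ≤ n.toNat := pvMax_le (by omega) hc
  have e2 : (List.range n.toNat).map (fun (L : Nat) => t c n - t c ((L : Nat) : Int))
      = (List.range n.toNat).map
        (fun (L : Nat) => w ^ (c.length - 1) *
          ((1 : Int) - (if ((pvMax c : Nat) : Int) ≤ ((L : Nat) : Int) then 1 else 0))) := by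
    apply List.map_congr_left
    intro L _
    have h1 : ((pvMax c : Nat) : Int) ≤ n := by omega
    simp only [hT]
    rw [if_pos h1]
    ring
  rw [e2, List.sum_map_mul_left, pvCount (pvMax c) n.toNat hMx1 hMxn]


-- ===== VERDICT (by name: the statement is the Claim_ definition above) =====
theorem f_via_compositions_spec : Claim_equal_f_via_compositions := by
  intro n _
  unfold Spec_f_via_compositions
  by_cases hn : n ≤ 0
  · simp [f_via_compositions, f_via_compositions_alt, hn]
  · have h1 : 1 ≤ n := by omega
    rw [pvA_eq n h1, pvB_eq n h1, pvSums_eq n h1]
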